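-- pv_equiv track=rewrite | github.com/murraycoding/Algorithm_Practice | reverse_a_string.py | reverse_string3
-- ===== SOURCE A (Python) =====
-- def reverse_string3(str):
--     spec_chars = ['!','@','#','$','%','&','^','*']
--     temp = []
--     str_list = list(str)                         # Coverts the string to a list
--     for i, char in enumerate(str_list,start=0):
--         if not char in spec_chars:               # Check to see if the char is 'sepcial'
--             temp.insert(0,char)                  # inserts letter in temp array
--             str_list[i] = ''                     # replaces the char with ''
--
--     # Takes the temp list and replaces all ''s with the chars backwards.
--     for char in temp:
--         for x in range(0,len(str_list)):
--             if not str_list[x]: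
--                 str_list[x] = char
--                 break
--
--     return ''.join(str_list)                    # returns the str_list joined into a string
-- ===== SOURCE B (Python) =====
-- def reverse_string3(str):
--     spec_chars = {'!', '@', '#', '$', '%', '&', '^', '*'}
--     it = iter([c for c in str if c not in spec_chars][::-1])
--     return ''.join(c if c in spec_chars else next(it) for c in str)
-- ===== Notes on version B (the rewrite author's own statement) =====
-- stated objective: faster
-- what changed: B collects the non-special characters once, reverses them, and fills them back in a single left-to-right pass via an iterator, instead of A's insert(0,...) plus a full inner scan of the list for the first empty slot per character.
import Mathlib
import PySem

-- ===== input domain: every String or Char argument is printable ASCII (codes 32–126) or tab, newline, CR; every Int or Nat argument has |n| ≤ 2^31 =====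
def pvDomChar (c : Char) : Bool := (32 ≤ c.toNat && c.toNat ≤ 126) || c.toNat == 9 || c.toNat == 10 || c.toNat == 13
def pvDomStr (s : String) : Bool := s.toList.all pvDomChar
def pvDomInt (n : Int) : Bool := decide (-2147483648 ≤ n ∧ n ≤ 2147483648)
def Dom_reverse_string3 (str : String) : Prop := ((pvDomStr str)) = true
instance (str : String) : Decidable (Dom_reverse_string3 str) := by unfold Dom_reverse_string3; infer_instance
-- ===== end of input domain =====

-- B reverses the non-special characters with one collect + one fill pass (O(n))
-- instead of A's insert(0,..) and per-character inner scan for the first blank (O(n^2)).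

-- ===== PORT A =====
-- the spec_chars list of A
def specChars : List Char := ['!', '@', '#', '$', '%', '&', '^', '*']

-- a cell of A's str_list: `some c` = the character, `none` = the '' A writes over it
-- first loop of A: foldl over the string, accumulating temp (insert at 0 = cons)
-- and the mutated str_list in reverse build order
def phase1Step (acc : List Char × List (Option Char)) (c : Char) :
    List Char × List (Option Char) :=
  if specChars.contains c then (acc.1, some c :: acc.2)
  else (c :: acc.1, none :: acc.2)

-- inner loop of A's second phase: scan for the first '' cell, set it, break
def fillFirst : List (Option Char) → Char → List (Option Char)
  | [], _ => []
  | none :: rest, c => some c :: rest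
  | some x :: rest, c => some x :: fillFirst rest c

-- ''.join over cells ('' contributes nothing)
def joinCells : List (Option Char) → List Char
  | [] => []
  | none :: r => joinCells r
  | some c :: r => c :: joinCells r

def reverse_string3 (str : String) : String :=
  let p := str.toList.foldl phase1Step ([], [])
  let temp := p.1
  let str_list := p.2.reverse
  String.mk (joinCells (temp.foldl fillFirst str_list))

-- ===== PORT B =====
-- single fill pass: special chars stay, non-special chars are drawn from `rev`
-- (the [] branch on a non-special char is unreachable when rev is the full reversed
--  collection; Python's next() never runs out there)
def fillPass : List Char → List Char → List Char
  | [], _ => []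
  | c :: rest, rev =>
    if specChars.contains c then c :: fillPass rest rev
    else match rev with
      | r :: rs => r :: fillPass rest rs
      | [] => fillPass rest []

def reverse_string3_alt (str : String) : String :=
  let rev := (str.toList.filter (fun c => !specChars.contains c)).reverse
  String.mk (fillPass str.toList rev)

-- ===== PRECONDITION & SPEC =====
def Spec_reverse_string3 (str : String) (out : String) : Prop := out = reverse_string3_alt str
instance (str : String) (out : String) : Decidable (Spec_reverse_string3 str out) := by unfold Spec_reverse_string3; infer_instance

-- ===== CLAIM (what is proved, stated in full; the proofs are below) =====
def Claim_equal_reverse_string3 : Prop := ∀ (str : String), Dom_reverse_string3 str → Spec_reverse_string3 str (reverse_string3 str)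

-- ===== LEMMAS AND PROOFS =====

-- the char → cell map realised by A's first loop
def markCell (c : Char) : Option Char :=
  if specChars.contains c then some c else none

theorem phase1_spec (s : List Char) (t : List Char) (m : List (Option Char)) :
    s.foldl phase1Step (t, m) =
      ((s.filter (fun c => !specChars.contains c)).reverse ++ t,
       (s.map markCell).reverse ++ m) := by
  induction s generalizing t m with
  | nil => simp
  | cons c s ih =>
    simp only [List.foldl_cons, phase1Step, markCell, List.filter_cons, List.map_cons]
    by_cases h : c ∈ specChars <;> simp [h, ih]

theorem foldl_fillFirst_nil (t : List Char) : t.foldl fillFirst [] = [] := by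
  induction t with
  | nil => rfl
  | cons c t ih => simpa [fillFirst] using ih

theorem foldl_fillFirst_some (t : List Char) (x : Char) (m : List (Option Char)) :
    t.foldl fillFirst (some x :: m) = some x :: t.foldl fillFirst m := by
  induction t generalizing m with
  | nil => rfl
  | cons c t ih => simpa [fillFirst] using ih (fillFirst m c)

theorem fill_eq_fillPass (s : List Char) (t : List Char) :
    joinCells (t.foldl fillFirst (s.map markCell)) = fillPass s t := by
  induction s generalizing t with
  | nil => simp [foldl_fillFirst_nil, joinCells, fillPass]
  | cons c s ih =>
    by_cases h : c ∈ specChars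
    · simp [markCell, h, foldl_fillFirst_some, joinCells, fillPass, ih]
    · cases t with
      | nil =>
        have h0 := ih ([] : List Char)
        simp only [List.foldl_nil] at h0
        simp [markCell, h, joinCells, fillPass, h0]
      | cons r t =>
        simp [markCell, h, fillFirst, foldl_fillFirst_some, joinCells, fillPass, ih]

-- ===== VERDICT (by name: the statement is the Claim_ definition above) =====
theorem reverse_string3_spec : Claim_equal_reverse_string3 := by
  intro str _
  unfold Spec_reverse_string3 reverse_string3 reverse_string3_alt
  have h := phase1_spec str.toList [] []
  simp only [h, List.append_nil, List.reverse_reverse]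
  rw [fill_eq_fillPass]
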